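-- pv_equiv track=rewrite | github.com/Midotech31/g-synth-toolkit | G-Synth_2025_5_Streamlit.py | optimal_alignment
-- ===== SOURCE A (Python) =====
-- def optimal_alignment(forward, reverse_comp, max_shift=None):
--     """Find best alignment shift between forward and reverse complement."""
--     if max_shift is None:
--         max_shift = len(forward) + len(reverse_comp)
--     else:
--         max_shift = min(max_shift, len(forward) + len(reverse_comp))
--
--     best = (0, 0)  # (shift, score)
--
--     def is_complement(base1, base2):
--         comp = {'A': 'T', 'T': 'A', 'G': 'C', 'C': 'G', 'N': 'N'}
--         return comp.get(base1.upper(), '') == base2.upper()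
--
--     for shift in range(-len(reverse_comp)+1, len(forward)):
--         score = 0
--         for i in range(max(0, shift), min(len(forward), shift + len(reverse_comp))):
--             j = i - shift
--             if 0 <= j < len(reverse_comp) and is_complement(forward[i], reverse_comp[j]):
--                 score += 1
--
--         if score > best[1]:
--             best = (shift, score)
--
--     return best
-- ===== SOURCE B (Python) =====
-- def optimal_alignment(forward, reverse_comp, max_shift=None):
--     """Find best alignment shift between forward and reverse complement."""
--     comp = {'A': 'T', 'T': 'A', 'G': 'C', 'C': 'G', 'N': 'N'}
--     # index reverse_comp: uppercased base -> list of its positions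
--     positions = {}
--     for j, b in enumerate(reverse_comp):
--         positions.setdefault(b.upper(), []).append(j)
--     # one pass over forward: bump a counter only for shifts of actual matches
--     counts = {}
--     for i, a in enumerate(forward):
--         for j in positions.get(comp.get(a.upper(), ''), []):
--             s = i - j
--             counts[s] = counts.get(s, 0) + 1
--     best = (0, 0)
--     for shift in range(-len(reverse_comp) + 1, len(forward)):
--         sc = counts.get(shift, 0)
--         if sc > best[1]:
--             best = (shift, sc)
--     return best
-- ===== Notes on version B (the rewrite author's own statement) =====
-- stated objective: faster
-- what changed: B inverts the computation: instead of rescanning the overlap for every shift, it builds a position index of reverse_comp by uppercased base, makes one pass over forward bumping a shift->count dictionary only at actual complement matches, then scans shifts in order for the first strict maximum.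
import Mathlib
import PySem

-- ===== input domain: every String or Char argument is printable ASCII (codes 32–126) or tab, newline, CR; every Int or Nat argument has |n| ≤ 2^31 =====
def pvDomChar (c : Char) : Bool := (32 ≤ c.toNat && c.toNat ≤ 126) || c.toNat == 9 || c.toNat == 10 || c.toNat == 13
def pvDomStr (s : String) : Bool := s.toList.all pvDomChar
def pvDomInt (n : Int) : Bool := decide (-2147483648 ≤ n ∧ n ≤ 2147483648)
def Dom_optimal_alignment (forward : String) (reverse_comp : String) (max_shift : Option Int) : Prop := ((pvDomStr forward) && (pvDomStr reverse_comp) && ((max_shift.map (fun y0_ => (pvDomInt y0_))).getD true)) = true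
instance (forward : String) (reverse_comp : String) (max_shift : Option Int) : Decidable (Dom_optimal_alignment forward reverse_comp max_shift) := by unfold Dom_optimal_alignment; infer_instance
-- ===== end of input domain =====

-- B replaces A's per-shift rescan of the overlap by a position index of reverse_comp and one pass
-- over forward bumping a shift->count dictionary at actual complement matches, then a scan of shifts.

-- the complement table and the is_complement test, shared verbatim by both Pythons
def pvCompTable : PySem.Dict (List Char) (List Char) :=
  PySem.Dict.ofList [(['A'], ['T']), (['T'], ['A']), (['G'], ['C']), (['C'], ['G']), (['N'], ['N'])]

def pvIsComplement (b1 b2 : Char) : Bool :=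
  PySem.Dict.getD pvCompTable (PySem.Chars.upper [b1]) [] == PySem.Chars.upper [b2]

-- ===== PORT A =====
def optimal_alignment (forward : String) (reverse_comp : String) (max_shift : Option Int) : Int × Int :=
  let F := forward.toList
  let R := reverse_comp.toList
  let _max_shift : Int := match max_shift with
    | none => (F.length : Int) + (R.length : Int)
    | some v => min v ((F.length : Int) + (R.length : Int))
  (PySem.List.pyRange (-(R.length : Int) + 1) (F.length : Int) 1).foldl
    (fun best shift =>
      let score : Int :=
        (PySem.List.pyRange (max 0 shift) (min (F.length : Int) (shift + (R.length : Int))) 1).foldl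
          (fun score i =>
            let j := i - shift
            if 0 ≤ j ∧ j < (R.length : Int) ∧
                pvIsComplement (PySem.List.pyGetD F i ' ') (PySem.List.pyGetD R j ' ') = true
            then score + 1 else score) 0
      if score > best.2 then (shift, score) else best)
    ((0 : Int), (0 : Int))

-- ===== PORT B =====
def optimal_alignment_alt (forward : String) (reverse_comp : String) (max_shift : Option Int) : Int × Int :=
  let F := forward.toList
  let R := reverse_comp.toList
  -- positions: uppercased base -> list of its positions in reverse_comp
  let positions : PySem.Dict (List Char) (List Int) :=
    (PySem.List.enumerate R).foldl
      (fun d p => d.modify (PySem.Chars.upper [p.2]) [] (· ++ [p.1])) PySem.Dict.empty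
  -- one pass over forward: bump counts[i - j] for every matching position j
  let counts : PySem.Dict Int Int :=
    (PySem.List.enumerate F).foldl
      (fun d p =>
        (positions.getD (PySem.Dict.getD pvCompTable (PySem.Chars.upper [p.2]) []) []).foldl
          (fun d j => d.insert (p.1 - j) (d.getD (p.1 - j) 0 + 1)) d)
      PySem.Dict.empty
  (PySem.List.pyRange (-(R.length : Int) + 1) (F.length : Int) 1).foldl
    (fun best shift =>
      let sc := counts.getD shift 0
      if sc > best.2 then (shift, sc) else best)
    ((0 : Int), (0 : Int))

-- ===== PRECONDITION & SPEC =====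
def Spec_optimal_alignment (forward : String) (reverse_comp : String) (max_shift : Option Int) (out : Int × Int) : Prop := out = optimal_alignment_alt forward reverse_comp max_shift
instance (forward : String) (reverse_comp : String) (max_shift : Option Int) (out : Int × Int) : Decidable (Spec_optimal_alignment forward reverse_comp max_shift out) := by unfold Spec_optimal_alignment; infer_instance

-- ===== CLAIM =====
def Claim_equal_optimal_alignment : Prop := ∀ (forward : String) (reverse_comp : String) (max_shift : Option Int), Dom_optimal_alignment forward reverse_comp max_shift → Spec_optimal_alignment forward reverse_comp max_shift (optimal_alignment forward reverse_comp max_shift)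

-- ===== LEMMAS AND PROOFS =====

-- the common count: number of positions i of forward whose partner i-s in reverse_comp is a complement
def pvCnt (F R : List Char) (s : Int) : Nat :=
  (PySem.List.pyRange 0 (F.length : Int) 1).countP
    (fun i => decide (0 ≤ i - s ∧ i - s < (R.length : Int) ∧
      pvIsComplement (PySem.List.pyGetD F i ' ') (PySem.List.pyGetD R (i - s) ' ') = true))

-- A's inner loop over the overlap window counts pvCnt (the predicate is false outside the window)
theorem pv_scoreA (F R : List Char) (s : Int)
    (h1 : -(R.length : Int) + 1 ≤ s) (h2 : s < (F.length : Int)) :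
    (PySem.List.pyRange (max 0 s) (min (F.length : Int) (s + (R.length : Int))) 1).foldl
      (fun score i =>
        if 0 ≤ i - s ∧ i - s < (R.length : Int) ∧
            pvIsComplement (PySem.List.pyGetD F i ' ') (PySem.List.pyGetD R (i - s) ' ') = true
        then score + 1 else score) 0 = (pvCnt F R s : Int) := by
  rw [PySem.List.foldl_ite_add_one
        (fun i => 0 ≤ i - s ∧ i - s < (R.length : Int) ∧
          pvIsComplement (PySem.List.pyGetD F i ' ') (PySem.List.pyGetD R (i - s) ' ') = true),
      zero_add]
  unfold pvCnt
  have nI : (0 : Int) ≤ (F.length : Int) := by positivity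
  rw [PySem.List.pyRange_one_append 0 (max 0 s) (F.length : Int) (by omega) (by omega),
      PySem.List.pyRange_one_append (max 0 s) (min (F.length : Int) (s + (R.length : Int)))
        (F.length : Int) (by omega) (by omega),
      List.countP_append, List.countP_append]
  have hlo : (PySem.List.pyRange 0 (max 0 s) 1).countP
      (fun i => decide (0 ≤ i - s ∧ i - s < (R.length : Int) ∧
        pvIsComplement (PySem.List.pyGetD F i ' ') (PySem.List.pyGetD R (i - s) ' ') = true)) = 0 := by
    rw [List.countP_eq_zero]
    intro i hi
    have := PySem.List.mem_pyRange_one.mp hi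
    simp only [decide_eq_true_eq, not_and]
    intro hc; omega
  have hhi : (PySem.List.pyRange (min (F.length : Int) (s + (R.length : Int))) (F.length : Int) 1).countP
      (fun i => decide (0 ≤ i - s ∧ i - s < (R.length : Int) ∧
        pvIsComplement (PySem.List.pyGetD F i ' ') (PySem.List.pyGetD R (i - s) ' ') = true)) = 0 := by
    rw [List.countP_eq_zero]
    intro i hi
    have := PySem.List.mem_pyRange_one.mp hi
    simp only [decide_eq_true_eq, not_and]
    intro hc hc2; omega
  omega

-- keyed grouping loop: the positions dictionary looked up at c is the ordered list of values under key c
theorem pv_getD_foldl_modify_key {α : Type} (l : List α) (key : α → List Char) (val : α → Int)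
    (d : PySem.Dict (List Char) (List Int)) (c : List Char) :
    (l.foldl (fun d x => d.modify (key x) [] (· ++ [val x])) d).getD c []
      = d.getD c [] ++ (l.filter (fun x => key x == c)).map val := by
  induction l generalizing d with
  | nil => simp
  | cons a t ih =>
    rw [List.foldl_cons, ih, List.filter_cons]
    by_cases h : key a = c
    · subst h; simp [PySem.Dict.getD_modify_self]
    · simp [PySem.Dict.getD_modify_of_ne _ _ _ (Ne.symm h), h]

-- keyed counting loop: a fold of counter increments at (key x) counts occurrences in the key image
theorem pv_getD_foldl_insert_key {α : Type} (l : List α) (key : α → Int)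
    (d : PySem.Dict Int Int) (v : Int) :
    (l.foldl (fun d x => d.insert (key x) (d.getD (key x) 0 + 1)) d).getD v 0
      = d.getD v 0 + ((l.map key).count v : Int) := by
  induction l generalizing d with
  | nil => simp
  | cons a t ih =>
    rw [List.foldl_cons, ih, List.map_cons, List.count_cons, PySem.Dict.getD_insert]
    by_cases h : v = key a
    · subst h; rw [if_pos rfl]; simp; ring
    · rw [if_neg h]; simp [Ne.symm h]

-- nested version: B's counts loop counts occurrences in the flattened shift list
theorem pv_nested_counter {α : Type} (L : List α) (g : α → List Int) (key : α → Int → Int)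
    (d : PySem.Dict Int Int) (v : Int) :
    (L.foldl (fun d x => (g x).foldl
        (fun d j => d.insert (key x j) (d.getD (key x j) 0 + 1)) d) d).getD v 0
      = d.getD v 0 + ((L.flatMap (fun x => (g x).map (key x))).count v : Int) := by
  induction L generalizing d with
  | nil => simp
  | cons a t ih =>
    rw [List.foldl_cons, ih, pv_getD_foldl_insert_key (g a) (key a) d v,
        List.flatMap_cons, List.count_append]
    push_cast; ring

-- how many j's of reverse_comp lie under key c and equal v
theorem pv_pos_count (R : List Char) (c : List Char) (v : Int) :
    (((PySem.List.enumerate R).foldl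
        (fun d p => d.modify (PySem.Chars.upper [p.2]) [] (· ++ [p.1]))
        PySem.Dict.empty).getD c []).count v
      = if 0 ≤ v ∧ v < (R.length : Int) ∧
          (PySem.Chars.upper [PySem.List.pyGetD R v ' '] == c) = true then 1 else 0 := by
  rw [pv_getD_foldl_modify_key (PySem.List.enumerate R) (fun p => PySem.Chars.upper [p.2]) (fun p => p.1)
        PySem.Dict.empty c, PySem.Dict.getD_empty, List.nil_append]
  rw [PySem.List.enumerate_eq_map_pyRange R ' ', List.filter_map, List.map_map]
  simp only [Function.comp_def, PySem.List.len, List.map_id']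
  by_cases hv : 0 ≤ v ∧ v < (R.length : Int)
  · have hnd : (PySem.List.pyRange 0 (R.length : Int) 1).Nodup := by
      rw [PySem.List.pyRange_one]
      exact (List.nodup_range).map (fun a b h => by omega)
    have h1 : (PySem.List.pyRange 0 (R.length : Int) 1).count v = 1 :=
      List.count_eq_one_of_mem hnd (PySem.List.mem_pyRange_one.mpr (by omega))
    by_cases hc : (PySem.Chars.upper [PySem.List.pyGetD R v ' '] == c) = true
    · rw [List.count_filter (p := fun j => PySem.Chars.upper [PySem.List.pyGetD R j ' '] == c) (a := v) hc, h1, if_pos ⟨hv.1, hv.2, hc⟩]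
    · have hnm : v ∉ (PySem.List.pyRange 0 (R.length : Int) 1).filter
          (fun j => PySem.Chars.upper [PySem.List.pyGetD R j ' '] == c) := by
        intro hmem
        exact hc (List.of_mem_filter (p := fun j => PySem.Chars.upper [PySem.List.pyGetD R j ' '] == c) hmem)
      rw [List.count_eq_zero_of_not_mem hnm, if_neg (by tauto)]
  · have hnm : v ∉ (PySem.List.pyRange 0 (R.length : Int) 1).filter
        (fun j => PySem.Chars.upper [PySem.List.pyGetD R j ' '] == c) := by
      intro hmem
      exact (PySem.List.mem_pyRange_one.mp (List.mem_of_mem_filter hmem)).elim (fun h1 h2 => hv ⟨h1, h2⟩)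
    rw [List.count_eq_zero_of_not_mem hnm, if_neg (by tauto)]

-- B's counts dictionary looked up at s is pvCnt
theorem pv_countsB (F R : List Char) (s : Int) :
    ((PySem.List.enumerate F).foldl
        (fun d p =>
          ((((PySem.List.enumerate R).foldl
              (fun d p => d.modify (PySem.Chars.upper [p.2]) [] (· ++ [p.1]))
              PySem.Dict.empty)).getD (PySem.Dict.getD pvCompTable (PySem.Chars.upper [p.2]) []) []).foldl
            (fun d j => d.insert (p.1 - j) (d.getD (p.1 - j) 0 + 1)) d)
        PySem.Dict.empty).getD s 0 = (pvCnt F R s : Int) := by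
  rw [pv_nested_counter (PySem.List.enumerate F)
        (fun p => (((PySem.List.enumerate R).foldl
            (fun d p => d.modify (PySem.Chars.upper [p.2]) [] (· ++ [p.1]))
            PySem.Dict.empty)).getD (PySem.Dict.getD pvCompTable (PySem.Chars.upper [p.2]) []) [])
        (fun p j => p.1 - j) PySem.Dict.empty s, PySem.Dict.getD_empty, zero_add]
  congr 1
  rw [List.count_eq_countP, List.countP_flatMap]
  have hterm : ∀ p ∈ PySem.List.enumerate F,
      (List.countP (fun x => x == s) ∘ fun p : Int × Char =>
        ((((PySem.List.enumerate R).foldl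
            (fun d p => d.modify (PySem.Chars.upper [p.2]) [] (· ++ [p.1]))
            PySem.Dict.empty)).getD (PySem.Dict.getD pvCompTable (PySem.Chars.upper [p.2]) []) []).map
          (fun j => p.1 - j)) p
      = if (0 ≤ p.1 - s ∧ p.1 - s < (R.length : Int) ∧
          (PySem.Chars.upper [PySem.List.pyGetD R (p.1 - s) ' ']
            == PySem.Dict.getD pvCompTable (PySem.Chars.upper [p.2]) []) = true : Prop) then 1 else 0 := by
    intro p _
    simp only [Function.comp_def]
    rw [← List.count_eq_countP]
    have hinj : Function.Injective (fun j : Int => p.1 - j) := fun a b h => by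
      simp only [sub_right_inj] at h; exact h
    have hs := List.count_map_of_injective
      (((PySem.List.enumerate R).foldl
          (fun d p => d.modify (PySem.Chars.upper [p.2]) [] (· ++ [p.1]))
          PySem.Dict.empty).getD (PySem.Dict.getD pvCompTable (PySem.Chars.upper [p.2]) []) [])
      (fun j : Int => p.1 - j) hinj (p.1 - s)
    simp only [sub_sub_cancel] at hs
    rw [hs, pv_pos_count]
  rw [List.map_congr_left hterm, PySem.List.sum_map_ite_one_zero_nat']
  unfold pvCnt
  rw [PySem.List.enumerate_eq_map_pyRange F ' ', List.countP_map]
  refine List.countP_congr ?_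
  intro i _
  simp only [Function.comp_def, decide_eq_true_eq, pvIsComplement, beq_iff_eq]
  constructor
  · rintro ⟨a, b, cEq⟩; exact ⟨a, b, cEq.symm⟩
  · rintro ⟨a, b, cEq⟩; exact ⟨a, b, cEq.symm⟩

-- ===== VERDICT =====
theorem optimal_alignment_spec : Claim_equal_optimal_alignment := by
  intro forward reverse_comp max_shift _
  show optimal_alignment forward reverse_comp max_shift
      = optimal_alignment_alt forward reverse_comp max_shift
  simp only [optimal_alignment, optimal_alignment_alt]
  apply PySem.List.foldl_congr_mem
  intro acc shift hmem
  have hb := PySem.List.mem_pyRange_one.mp hmem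
  rw [pv_scoreA forward.toList reverse_comp.toList shift (by omega) (by omega),
      pv_countsB forward.toList reverse_comp.toList shift]
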